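-- pv_equiv track=rewrite | github.com/yhibo/foobar | Level_5/disorderly_escape/solution.py | solution
-- ===== SOURCE A (Python) =====
-- from math import factorial as fact
-- from collections import Counter
-- from itertools import product as iproduct
--
-- def gcd(a, b):
--     """Return the greatest common divisor of a and b."""
--     while b:
--         a, b = b, a % b
--     return a
--
-- def partitions(n, i=1):
--     """Return a list of all partitions of n."""
--     if n == 0:
--         yield []
--     for k in range(i, n+1):
--         for p in partitions(n-k, k):
--             yield [k] + p
--
-- def num_permutations(n, partition):
--     """Return the number of permutations of the given partition."""
--     r = fact(n)
--     c = Counter(partition)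
--     p = 1
--     for k, c_k in c.items():
--         p *= fact(c_k) * k ** c_k
--     return r // p
--
-- def log_fixed(p, q):
--     """Return the number of cycles of the given configuration."""
--     result = sum(gcd(i, j) for i in p for j in q)
--     return int(result)
--
-- def solution(w, h, s):
--     """Solves the problem."""
--     RP = [tuple(p) for p in partitions(h)]
--     CP = [tuple(p) for p in partitions(w)]
--
--     RP_perms = {rp: num_permutations(h, rp) for rp in RP}
--     CP_perms = (
--         RP_perms if w == h else
--         {cp: num_permutations(w, cp) for cp in CP}
--     )
--
--     result = sum(
--         RP_perms[rp] * CP_perms[cp] * (s ** log_fixed(rp, cp))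
--         for rp, cp in iproduct(RP, CP)
--     )
--
--     return str(result // (fact(w) * fact(h)))
-- ===== SOURCE B (Python) =====
-- from math import factorial as fact, gcd
--
-- def solution(w, h, s):
--     """Burnside over row cycle types only: for each row type the whole column-side sum
--     sum_q |class q| * s^cycles(p,q)  equals  C_w, where C_n follows the cycle-index
--     convolution  C_0 = 1,  C_n = sum_{k=1..n} (n-1)!/(n-k)! * x_k * C_{n-k}
--     with x_j = s**(sum_{i in p} gcd(i, j)); no column partitions are enumerated."""
--     def row_types(rem, mn):
--         if rem == 0:
--             yield []
--             return
--         for k in range(mn, rem + 1):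
--             for t in row_types(rem - k, k):
--                 yield [k] + t
--
--     total = 0
--     for p in row_types(h, 1):
--         # class size h!/prod(c_k! k^c_k) via a run-length scan of the sorted type
--         wt = fact(h)
--         run, prev = 0, 0
--         for i in p:
--             run = run + 1 if i == prev else 1
--             prev = i
--             wt //= run * i
--         x = [s ** sum(gcd(i, j) for i in p) for j in range(1, w + 1)]
--         C = [1] + [0] * w
--         for n in range(1, w + 1):
--             acc, coef = 0, 1
--             for k in range(1, n + 1):
--                 acc += coef * x[k - 1] * C[n - k]
--                 coef *= n - k
--             C[n] = acc
--         total += wt * C[w]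
--     return str(total // (fact(w) * fact(h)))
-- ===== Notes on version B (the rewrite author's own statement) =====
-- stated objective: faster
-- what changed: B never enumerates column partitions: for each row cycle type it evaluates the whole column-side sum with the cycle-index convolution recurrence C_0=1, C_n=sum_k (n-1)!/(n-k)! * x_k * C_{n-k} (x_j = s^(sum gcd)), an O(w^2) DP replacing A's sum over all p(w) column partitions with dict lookups, and computes each class size by a run-length scan of the sorted type instead of a Counter.
import Mathlib
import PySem

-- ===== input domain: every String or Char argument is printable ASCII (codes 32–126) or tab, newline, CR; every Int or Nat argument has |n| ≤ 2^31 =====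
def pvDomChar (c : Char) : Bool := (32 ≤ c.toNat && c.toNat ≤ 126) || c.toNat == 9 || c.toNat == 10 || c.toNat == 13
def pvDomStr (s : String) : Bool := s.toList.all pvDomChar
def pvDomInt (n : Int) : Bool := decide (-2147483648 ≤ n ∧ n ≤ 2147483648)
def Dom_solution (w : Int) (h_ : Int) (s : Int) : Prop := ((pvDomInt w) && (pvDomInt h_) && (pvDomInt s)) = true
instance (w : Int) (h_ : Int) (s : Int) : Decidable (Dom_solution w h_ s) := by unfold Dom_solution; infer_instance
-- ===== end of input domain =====

-- B never enumerates column partitions: per row cycle type it evaluates the column-side sum by the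
-- cycle-index convolution DP C_0=1, C_n = sum_k (n-1)!/(n-k)! * x_k * C_{n-k}, and computes class
-- sizes by a run-length scan of the sorted type (objective: faster).

-- ===== PORT A =====

-- math.factorial; Python raises ValueError for n < 0 (excluded by Pre_)
def factI (n : Int) : Int := (Nat.factorial n.toNat : Int)

-- A's hand-written Euclid `while b: a, b = b, a % b`
def gcdA (a b : Int) : Int :=
  if hb : b = 0 then a else gcdA b (PySem.Int.mod a b)
termination_by b.natAbs
decreasing_by
  rcases lt_trichotomy b 0 with hlt | he | hgt
  · have h1 := PySem.Int.mod_neg_bounds a hlt; omega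
  · exact absurd he hb
  · have h1 := PySem.Int.mod_nonneg a hgt; have h2 := PySem.Int.mod_lt a hgt; omega

-- A's generator `partitions(n, i)`, with a fuel counter as a pure totality guard
-- (one unit per recursive call; the top-level call passes enough fuel for its whole recursion tree)
def partsA : Nat → Int → Int → List (List Int)
  | 0, _, _ => []
  | f+1, n, i =>
      (if n = 0 then [[]] else []) ++
        (PySem.List.pyRange i (n+1)).flatMap (fun k => (partsA f (n-k) k).map (fun p => k :: p))

-- A's num_permutations
def numPerms (n : Int) (p : List Int) : Int :=
  let r := factI n
  let c := PySem.Dict.counter p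
  let pr := c.items.foldl (fun acc kv => acc * (factI kv.2 * kv.1 ^ kv.2.toNat)) 1
  PySem.Int.floordiv r pr

-- A's log_fixed (the sum of gcds is nonnegative on every reachable input, so `s ** _` is `s ^ _.toNat`)
def logFixed (p q : List Int) : Int := (p.flatMap (fun i => q.map (fun j => gcdA i j))).sum

def solution (w : Int) (h_ : Int) (s : Int) : String :=
  let RP := partsA (h_.toNat+1) h_ 1
  let CP := partsA (w.toNat+1) w 1
  let RPp := RP.foldl (fun d rp => d.insert rp (numPerms h_ rp)) PySem.Dict.empty
  let CPp := if w = h_ then RPp else CP.foldl (fun d cp => d.insert cp (numPerms w cp)) PySem.Dict.empty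
  let result := ((RP.flatMap (fun rp => CP.map (fun cp => (rp, cp)))).map
      (fun pr => RPp.getD pr.1 0 * CPp.getD pr.2 0 * s ^ (logFixed pr.1 pr.2).toNat)).sum
  PySem.Int.toStr (PySem.Int.floordiv result (factI w * factI h_))

-- ===== PORT B =====

-- B's nested generator `row_types(rem, mn)` (same fuel-style totality guard)
def rowTypes : Nat → Int → Int → List (List Int)
  | 0, _, _ => []
  | f+1, rem, mn =>
      if rem = 0 then [[]]
      else (PySem.List.pyRange mn (rem+1)).flatMap (fun k => (rowTypes f (rem-k) k).map (fun t => k :: t))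

def solution_alt (w : Int) (h_ : Int) (s : Int) : String :=
  let total := (rowTypes (h_.toNat+1) h_ 1).foldl (fun total p =>
    -- class size via the run-length scan; state (wt, run, prev)
    let wt := (p.foldl (fun st i =>
        let run := if i = st.2.2 then st.2.1 + 1 else 1
        (PySem.Int.floordiv st.1 (run * i), run, i)) (factI h_, (0:Int), (0:Int))).1
    -- x[j-1] = s ** sum(gcd(i, j) for i in p); the exponent is a sum of gcds, hence ≥ 0
    let x := (PySem.List.pyRange 1 (w+1)).map (fun j =>
        s ^ ((p.map (fun i => (Int.gcd i j : Int))).sum).toNat)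
    -- C = [1] + [0]*w, then the convolution loop (all list indices are provably in range and ≥ 0)
    let C := (PySem.List.pyRange 1 (w+1)).foldl (fun C n =>
        let ac := (PySem.List.pyRange 1 (n+1)).foldl (fun st k =>
            (st.1 + st.2 * (x.getD (k-1).toNat 0) * (C.getD (n-k).toNat 0), st.2 * (n - k)))
          ((0:Int), (1:Int))
        C.set n.toNat ac.1) ((1:Int) :: List.replicate w.toNat 0)
    total + wt * (C.getD w.toNat 0)) 0
  PySem.Int.toStr (PySem.Int.floordiv total (factI w * factI h_))

-- ===== PRECONDITION & SPEC =====
-- Python's factorial raises ValueError for a negative argument, so A raises whenever w < 0 or h < 0.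
def Pre_solution (w : Int) (h_ : Int) (s : Int) : Prop := 0 ≤ w ∧ 0 ≤ h_
instance (w : Int) (h_ : Int) (s : Int) : Decidable (Pre_solution w h_ s) := by unfold Pre_solution; infer_instance
def pvWitness_solution : Int × Int × Int := (2, 2, 2)

def Spec_solution (w : Int) (h_ : Int) (s : Int) (out : String) : Prop := out = solution_alt w h_ s
instance (w : Int) (h_ : Int) (s : Int) (out : String) : Decidable (Spec_solution w h_ s out) := by unfold Spec_solution; infer_instance

-- ===== CLAIM (what is proved, stated in full; the proofs are below) =====
def Claim_equal_solution : Prop := ∀ (w : Int) (h_ : Int) (s : Int), Dom_solution w h_ s → Pre_solution w h_ s → Spec_solution w h_ s (solution w h_ s)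


-- ===== LEMMAS AND PROOFS =====

-- ---------- generic partition machinery ----------

-- B's generator is A's generator (same Python loop structure, different guard shape)
theorem rowTypes_eq_partsA (f : Nat) (n i : Int) (hi : 1 ≤ i) :
    rowTypes f n i = partsA f n i := by
  induction f generalizing n i with
  | zero => rfl
  | succ f ih =>
    rw [rowTypes, partsA]
    by_cases hn : n = 0
    · subst hn
      rw [if_pos rfl, if_pos rfl, PySem.List.pyRange_one_eq_nil (by omega)]
      simp
    · rw [if_neg hn, if_neg hn, List.nil_append]
      exact List.flatMap_congr (fun k hk =>
        by rw [ih _ _ (le_trans hi (PySem.List.mem_pyRange_one.mp hk).1)])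

-- membership characterization of A's partition enumerator
theorem mem_partsA (f : Nat) (n i : Int) (q : List Int) (hf : n.toNat < f) (hi : 1 ≤ i) :
    q ∈ partsA f n i ↔ q.Pairwise (· ≤ ·) ∧ (∀ x ∈ q, i ≤ x) ∧ q.sum = n := by
  induction f generalizing n i q with
  | zero => omega
  | succ f ih =>
    simp only [partsA, List.mem_append, List.mem_flatMap, List.mem_map,
      PySem.List.mem_pyRange_one]
    constructor
    · rintro (hq | ⟨k, ⟨hik, hkn⟩, p, hp, rfl⟩)
      · have hn : n = 0 := by by_contra h; simp [h] at hq
        subst hn; simp at hq; subst hq; simp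
      · have hk1 : 1 ≤ k := le_trans hi hik
        have hfuel : (n - k).toNat < f := by omega
        obtain ⟨hpw, hge, hsum⟩ := (ih (n-k) k p hfuel hk1).mp hp
        refine ⟨List.pairwise_cons.mpr ⟨hge, hpw⟩, ?_, by simp at hsum ⊢; omega⟩
        intro x hx
        rcases List.mem_cons.mp hx with rfl | hxp
        · exact hik
        · exact le_trans hik (hge x hxp)
    · rintro ⟨hpw, hge, hsum⟩
      match q with
      | [] =>
        left; simp at hsum; simp [← hsum]
      | k :: p =>
        right
        have hk1 : 1 ≤ k := le_trans hi (hge k (by simp))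
        have hgep : ∀ x ∈ p, k ≤ x := fun x hx => (List.pairwise_cons.mp hpw).1 x hx
        have hpsum : 0 ≤ p.sum := List.sum_nonneg (fun x hx => le_trans (by omega) (hgep x hx))
        have hkn : k < n + 1 := by simp at hsum; omega
        have hfuel : (n - k).toNat < f := by omega
        refine ⟨k, ⟨hge k (by simp), hkn⟩, p, ?_, rfl⟩
        refine (ih (n-k) k p hfuel hk1).mpr ⟨(List.pairwise_cons.mp hpw).2, hgep, ?_⟩
        simp at hsum; omega

theorem nodup_partsA (f : Nat) (n i : Int) : (partsA f n i).Nodup := by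
  induction f generalizing n i with
  | zero => simp [partsA]
  | succ f ih =>
    rw [partsA]
    refine List.Nodup.append ?_ ?_ ?_
    · split <;> simp
    · refine List.nodup_flatMap.mpr ⟨fun k _ => (ih _ _).map (fun a b h => by simpa using h), ?_⟩
      refine (PySem.List.pairwise_lt_pyRange_one i (n+1)).imp ?_
      intro a b hab q hqa hqb
      rcases List.mem_map.mp hqa with ⟨p, _, rfl⟩
      rcases List.mem_map.mp hqb with ⟨p', _, hpq⟩
      have : a = b := by injection hpq.symm with h1 _
      omega
    · intro q hq
      split at hq
      · simp at hq; subst hq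
        intro hmem
        rcases List.mem_flatMap.mp hmem with ⟨k, _, hk⟩
        rcases List.mem_map.mp hk with ⟨p, _, hpq⟩
        exact List.cons_ne_nil _ _ hpq
      · simp at hq

-- the denominator of the class-size formula: prod over distinct parts of c_k! * k^c_k
def Dn (q : List Int) : Nat := ∏ k ∈ q.toFinset, (q.count k).factorial * k.toNat ^ (q.count k)

theorem Dn_pos (q : List Int) (hq : ∀ x ∈ q, 1 ≤ x) : 0 < Dn q := by
  refine Finset.prod_pos (fun k hk => ?_)
  have hk1 : 1 ≤ k := hq k (List.mem_toFinset.mp hk)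
  exact Nat.mul_pos (Nat.factorial_pos _) (pow_pos (by omega) _)

theorem Dn_perm (q q' : List Int) (h : q.Perm q') : Dn q = Dn q' := by
  unfold Dn
  rw [List.toFinset_eq_of_perm _ _ h]
  exact Finset.prod_congr rfl (fun k _ => by rw [h.count_eq])

theorem Dn_concat (l : List Int) (x : Int) :
    Dn (l ++ [x]) = Dn l * ((l.count x + 1) * x.toNat) := by
  have hcount : ∀ a : Int, (l ++ [x]).count a = l.count a + if a = x then 1 else 0 := by
    intro a; rw [List.count_append]
    by_cases hax : a = x
    · subst hax; simp
    · rw [if_neg hax]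
      have : List.count a [x] = 0 := by rw [List.count_eq_zero]; simp [hax]
      omega
  have htf : (l ++ [x]).toFinset = insert x l.toFinset := by
    ext a; simp
  unfold Dn
  rw [htf]
  by_cases hx : x ∈ l.toFinset
  · rw [Finset.insert_eq_self.mpr hx]
    rw [← Finset.mul_prod_erase _ _ hx, ← Finset.mul_prod_erase _ _ hx]
    have h1 : ∀ a ∈ l.toFinset.erase x,
        ((l ++ [x]).count a).factorial * a.toNat ^ ((l ++ [x]).count a)
          = (l.count a).factorial * a.toNat ^ (l.count a) := by
      intro a ha
      rw [hcount a, if_neg (Finset.mem_erase.mp ha).1]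
      simp
    rw [Finset.prod_congr rfl h1, hcount x, if_pos rfl]
    rw [Nat.factorial_succ]
    ring
  · rw [Finset.prod_insert hx]
    have h1 : ∀ a ∈ l.toFinset,
        ((l ++ [x]).count a).factorial * a.toNat ^ ((l ++ [x]).count a)
          = (l.count a).factorial * a.toNat ^ (l.count a) := by
      intro a ha
      rw [hcount a, if_neg (fun h : a = x => hx (h ▸ ha))]
      simp
    have hcx : l.count x = 0 := List.count_eq_zero_of_not_mem (fun h => hx (List.mem_toFinset.mpr h))
    rw [Finset.prod_congr rfl h1, hcount x, if_pos rfl, hcx]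
    simp [Nat.factorial]
    ring

theorem Dn_erase (q : List Int) (k : Int) (hk : k ∈ q) :
    Dn q = Dn (q.erase k) * (q.count k * k.toNat) := by
  have hperm : q.Perm ((q.erase k) ++ [k]) :=
    (List.perm_cons_erase hk).trans (List.perm_append_singleton k (q.erase k)).symm
  rw [Dn_perm _ _ hperm, Dn_concat]
  have : (q.erase k).count k + 1 = q.count k := by
    rw [List.count_erase_self]
    have : 1 ≤ q.count k := List.one_le_count_iff.mpr hk
    omega
  rw [this]

-- sum of count*part over distinct parts = the partitioned number
theorem sum_count_toNat (q : List Int) (hq : ∀ x ∈ q, 1 ≤ x) :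
    ∑ k ∈ q.toFinset, q.count k * k.toNat = q.sum.toNat := by
  have hz : (↑(∑ k ∈ q.toFinset, q.count k * k.toNat) : ℤ) = q.sum := by
    push_cast
    have h1 : ∀ k ∈ q.toFinset, (q.count k : ℤ) * (k.toNat : ℤ) = q.count k • k := by
      intro k hk
      have : ((k.toNat : ℤ)) = k := Int.toNat_of_nonneg (by linarith [hq k (List.mem_toFinset.mp hk)])
      rw [this, nsmul_eq_mul]
    rw [Finset.sum_congr rfl h1, Finset.sum_list_count q]
  have hnn : 0 ≤ q.sum := List.sum_nonneg (fun x hx => by linarith [hq x hx])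
  omega

-- the one-distinct-part-removal identity for class sizes, with divisibility
theorem removal (q : List Int) (hq : ∀ x ∈ q, 1 ≤ x) :
    Dn q ∣ (q.sum.toNat).factorial ∧ (q ≠ [] →
      (q.sum.toNat).factorial / Dn q
        = ∑ k ∈ q.toFinset, (q.sum.toNat - 1).descFactorial (k.toNat - 1)
            * ((q.sum.toNat - k.toNat).factorial / Dn (q.erase k))) := by
  induction hlen : q.length using Nat.strong_induction_on generalizing q with
  | _ L ih =>
  match q, hlen with
  | [], _ => exact ⟨by simp [Dn], by simp⟩
  | (a :: t), hlen =>
    set q := a :: t with hqdef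
    have hqne : q ≠ [] := by simp [hqdef]
    set n : ℕ := q.sum.toNat with hn
    have hsumpos : 0 < q.sum := by
      have : 1 ≤ a := hq a (by simp [hqdef])
      have : 0 ≤ t.sum := List.sum_nonneg (fun x hx => by
        have := hq x (by simp [hqdef, hx]); omega)
      simp [hqdef]; omega
    have hnpos : 0 < n := by omega
    -- facts per distinct part
    have hkfacts : ∀ k ∈ q.toFinset, 1 ≤ k ∧ k.toNat ≤ n ∧ (q.erase k).sum.toNat = n - k.toNat ∧
        Dn (q.erase k) ∣ (n - k.toNat).factorial := by
      intro k hk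
      have hkq : k ∈ q := List.mem_toFinset.mp hk
      have hk1 : 1 ≤ k := hq k hkq
      have hesum : (q.erase k).sum = q.sum - k := by
        have := List.sum_erase hkq
        omega
      have hge : ∀ x ∈ q.erase k, 1 ≤ x := fun x hx => hq x (List.mem_of_mem_erase hx)
      have hnn : 0 ≤ (q.erase k).sum := List.sum_nonneg (fun x hx => by linarith [hge x hx])
      have hkn : k.toNat ≤ n := by omega
      have htn : (q.erase k).sum.toNat = n - k.toNat := by omega
      have hql : 0 < q.length := by simp [hqdef]
      have := (ih (q.erase k).length (by
          rw [List.length_erase_of_mem hkq]; omega) (q.erase k) hge rfl).1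
      rw [htn] at this
      exact ⟨hk1, hkn, htn, this⟩
    -- the Nat-level product identity S * Dn q = n!
    set S : ℕ := ∑ k ∈ q.toFinset, (n - 1).descFactorial (k.toNat - 1)
            * ((n - k.toNat).factorial / Dn (q.erase k)) with hS
    have hkey : S * Dn q = n.factorial := by
      rw [hS, Finset.sum_mul]
      have hterm : ∀ k ∈ q.toFinset,
          (n - 1).descFactorial (k.toNat - 1) * ((n - k.toNat).factorial / Dn (q.erase k)) * Dn q
            = (n - 1).factorial * (q.count k * k.toNat) := by
        intro k hk
        obtain ⟨hk1, hkn, htn, hdvd⟩ := hkfacts k hk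
        rw [Dn_erase q k (List.mem_toFinset.mp hk)]
        calc (n - 1).descFactorial (k.toNat - 1) * ((n - k.toNat).factorial / Dn (q.erase k))
              * (Dn (q.erase k) * (q.count k * k.toNat))
            = (n - 1).descFactorial (k.toNat - 1) * ((n - k.toNat).factorial / Dn (q.erase k)
              * Dn (q.erase k)) * (q.count k * k.toNat) := by ring
          _ = (n - 1).descFactorial (k.toNat - 1) * (n - k.toNat).factorial * (q.count k * k.toNat) := by
              rw [Nat.div_mul_cancel hdvd]
          _ = (n - 1).factorial * (q.count k * k.toNat) := by
              have h1 : k.toNat - 1 ≤ n - 1 := by omega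
              have h2 : (n - 1) - (k.toNat - 1) = n - k.toNat := by omega
              rw [mul_comm ((n-1).descFactorial (k.toNat - 1)) ((n - k.toNat).factorial), ← h2,
                Nat.factorial_mul_descFactorial h1]
      rw [Finset.sum_congr rfl hterm, ← Finset.mul_sum, sum_count_toNat q hq, ← hn]
      have hf : n.factorial = n * (n-1).factorial := (Nat.mul_factorial_pred (by omega)).symm
      rw [hf]; ring
    have hdvdq : Dn q ∣ n.factorial := Dvd.intro_left S hkey
    refine ⟨hdvdq, fun _ => ?_⟩
    exact Nat.div_eq_of_eq_mul_left (Dn_pos q hq) hkey.symm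

-- ordered insertion is a two-sided inverse of erase on sorted lists
theorem erase_orderedInsert (l : List Int) (k : Int) :
    (l.orderedInsert (· ≤ ·) k).erase k = l := by
  induction l with
  | nil => simp
  | cons b t ih =>
    rw [List.orderedInsert]
    by_cases h : k ≤ b
    · rw [if_pos h, List.erase_cons_head]
    · rw [if_neg h, List.erase_cons_tail (by simp; omega), ih]

theorem orderedInsert_erase (q : List Int) (k : Int) (hk : k ∈ q) (hs : q.Pairwise (· ≤ ·)) :
    (q.erase k).orderedInsert (· ≤ ·) k = q := by
  induction q with
  | nil => simp at hk
  | cons b t ih =>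
    by_cases h : k = b
    · subst h
      rw [List.erase_cons_head]
      cases t with
      | nil => simp [List.orderedInsert]
      | cons c t2 =>
        have hkc : k ≤ c := (List.pairwise_cons.mp hs).1 c (by simp)
        rw [List.orderedInsert, if_pos hkc]
    · have hbk : b ≤ k := (List.pairwise_cons.mp hs).1 k (by
        rcases List.mem_cons.mp hk with h' | h'
        · exact absurd h' h
        · exact h')
      have hbk' : ¬ k ≤ b := by
        rcases lt_or_eq_of_le hbk with hlt | heq
        · omega
        · exact absurd heq.symm h
      have hkt : k ∈ t := by
        rcases List.mem_cons.mp hk with h' | h'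
        · exact absurd h' h
        · exact h'
      rw [List.erase_cons_tail (by simp; exact fun hh => h hh.symm), List.orderedInsert, if_neg hbk',
        ih hkt (List.pairwise_cons.mp hs).2]

-- the set of partitions of m with parts ≥ 1
def PF (m : Nat) : Finset (List Int) := (partsA (m+1) (m : Int) 1).toFinset

theorem mem_PF (m : Nat) (q : List Int) :
    q ∈ PF m ↔ q.Pairwise (· ≤ ·) ∧ (∀ x ∈ q, 1 ≤ x) ∧ q.sum = m := by
  rw [PF, List.mem_toFinset, mem_partsA _ _ _ q (by simp) le_rfl]

-- ---------- the cycle-index convolution values ----------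

-- CrecL x n = [C_n, C_(n-1), ..., C_0] for the recurrence C_0 = 1, C_n = sum desc * x_k * C_(n-k)
def CrecL (x : Int → Int) : Nat → List Int
  | 0 => [1]
  | n+1 =>
      let L := CrecL x n
      (((List.range (n+1)).map (fun k0 => (n.descFactorial k0 : Int) * x (k0+1) * L.getD k0 0)).sum) :: L

def Crec (x : Int → Int) (n : Nat) : Int := (CrecL x n).getD 0 0

theorem CrecL_getD (x : Int → Int) (n j : Nat) (hj : j ≤ n) :
    (CrecL x n).getD j 0 = Crec x (n - j) := by
  induction n generalizing j with
  | zero =>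
    interval_cases j
    rfl
  | succ n ih =>
    match j with
    | 0 => rfl
    | j'+1 =>
      show (CrecL x n).getD j' 0 = _
      rw [ih j' (by omega)]
      congr 1
      omega

theorem Crec_succ (x : Int → Int) (n : Nat) :
    Crec x (n+1)
      = ((List.range (n+1)).map (fun k0 => (n.descFactorial k0 : Int) * x (k0+1) * Crec x (n - k0))).sum := by
  show (((List.range (n+1)).map (fun k0 => (n.descFactorial k0 : Int) * x (k0+1) * (CrecL x n).getD k0 0)).sum) = _
  congr 1
  refine List.map_congr_left (fun k0 hk0 => ?_)
  rw [CrecL_getD x n k0 (by simpa using Nat.lt_succ_iff.mp (List.mem_range.mp hk0))]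

-- ---------- the main theorem: partition-sum = convolution DP ----------

theorem main_sum (x : Int → Int) (n : Nat) :
    ∑ q ∈ PF n, (((n.factorial / Dn q : Nat) : Int) * (q.map x).prod) = Crec x n := by
  induction n using Nat.strong_induction_on with
  | _ n ih =>
  match n with
  | 0 =>
    have h0 : PF 0 = {([] : List Int)} := by
      ext q
      rw [mem_PF]
      constructor
      · rintro ⟨_, h1, hsum⟩
        cases q with
        | nil => simp
        | cons a t =>
          exfalso
          have ha := h1 a (by simp)
          have ht : 0 ≤ t.sum := List.sum_nonneg (fun y hy => by linarith [h1 y (by simp [hy])])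
          simp at hsum
          omega
      · intro hq
        simp at hq
        subst hq
        simp
    rw [h0]
    simp [Dn, Crec, CrecL]
  | (m+1) =>
    classical
    -- Step A: expand each summand by the distinct-part-removal identity
    have stepA : ∀ q ∈ PF (m+1),
        (((m+1).factorial / Dn q : Nat) : Int) * (q.map x).prod
          = ∑ k ∈ q.toFinset, ((m.descFactorial (k.toNat - 1) : Int)
              * ((((m+1) - k.toNat).factorial / Dn (q.erase k) : Nat) : Int)
              * (x k * ((q.erase k).map x).prod)) := by
      intro q hq
      obtain ⟨hsrt, hpos, hsum⟩ := (mem_PF _ q).mp hq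
      have hqne : q ≠ [] := by rintro rfl; simp at hsum; omega
      have hsumt : q.sum.toNat = m+1 := by rw [hsum]; simp
      have hrem := (removal q hpos).2 hqne
      rw [hsumt] at hrem
      have hcast : (((m+1).factorial / Dn q : Nat) : Int)
          = ∑ k ∈ q.toFinset, ((m.descFactorial (k.toNat - 1) : Int)
              * ((((m+1) - k.toNat).factorial / Dn (q.erase k) : Nat) : Int)) := by
        rw [show (m+1) - 1 = m from rfl] at hrem
        rw [hrem]
        push_cast
        rfl
      rw [hcast, Finset.sum_mul]
      refine Finset.sum_congr rfl (fun k hk => ?_)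
      have hkq : k ∈ q := List.mem_toFinset.mp hk
      have hprod : (q.map x).prod = x k * ((q.erase k).map x).prod := by
        have := ((List.perm_cons_erase hkq).map x).prod_eq
        simpa using this
      rw [hprod]
      try ring
    rw [Finset.sum_congr rfl stepA]
    -- Step B: exchange the double sum by the (q,k) ↔ (k, q.erase k) bijection
    rw [Finset.sum_sigma' (PF (m+1)) (fun q => q.toFinset)]
    have stepB :
        ∑ a ∈ (PF (m+1)).sigma (fun q => q.toFinset),
            ((m.descFactorial (a.snd.toNat - 1) : Int)
              * ((((m+1) - a.snd.toNat).factorial / Dn (a.fst.erase a.snd) : Nat) : Int)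
              * (x a.snd * ((a.fst.erase a.snd).map x).prod))
          = ∑ b ∈ (Finset.Icc (1:Int) ((m:Int)+1)).sigma (fun k => PF ((m+1) - k.toNat)),
            ((m.descFactorial (b.fst.toNat - 1) : Int)
              * ((((m+1) - b.fst.toNat).factorial / Dn b.snd : Nat) : Int)
              * (x b.fst * (b.snd.map x).prod)) := by
      refine Finset.sum_nbij' (fun a => ⟨a.snd, a.fst.erase a.snd⟩)
        (fun b => ⟨b.snd.orderedInsert (· ≤ ·) b.fst, b.fst⟩) ?_ ?_ ?_ ?_ ?_
      · rintro ⟨q, k⟩ ha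
        rw [Finset.mem_sigma] at ha ⊢
        dsimp only at ha ⊢
        obtain ⟨hqPF, hkq'⟩ := ha
        obtain ⟨hsrt, hpos, hsum⟩ := (mem_PF _ q).mp hqPF
        have hkq : k ∈ q := List.mem_toFinset.mp hkq'
        have hk1 : 1 ≤ k := hpos k hkq
        have hesum : k + (q.erase k).sum = q.sum := List.sum_erase hkq
        have hnn : 0 ≤ (q.erase k).sum :=
          List.sum_nonneg (fun y hy => by linarith [hpos y (List.mem_of_mem_erase hy)])
        constructor
        · rw [Finset.mem_Icc]
          omega
        · rw [mem_PF]
          refine ⟨hsrt.sublist (List.erase_sublist ..), fun y hy => hpos y (List.mem_of_mem_erase hy), ?_⟩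
          omega
      · rintro ⟨k, r⟩ hb
        rw [Finset.mem_sigma] at hb ⊢
        dsimp only at hb ⊢
        obtain ⟨hk, hrPF⟩ := hb
        rw [Finset.mem_Icc] at hk
        obtain ⟨hsrt, hpos, hsum⟩ := (mem_PF _ r).mp hrPF
        have hperm := List.perm_orderedInsert (· ≤ ·) k r
        constructor
        · rw [mem_PF]
          refine ⟨List.Pairwise.orderedInsert k r hsrt, ?_, ?_⟩
          · intro y hy
            rcases List.mem_cons.mp (hperm.mem_iff.mp hy) with rfl | hyr
            · exact hk.1
            · exact hpos y hyr
          · rw [hperm.sum_eq]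
            simp at hsum ⊢
            omega
        · rw [List.mem_toFinset]
          exact hperm.mem_iff.mpr (by simp)
      · rintro ⟨q, k⟩ ha
        rw [Finset.mem_sigma] at ha
        obtain ⟨hqPF, hkq'⟩ := ha
        obtain ⟨hsrt, _, _⟩ := (mem_PF _ q).mp hqPF
        have hkq : k ∈ q := List.mem_toFinset.mp hkq'
        dsimp only
        rw [orderedInsert_erase q k hkq hsrt]
      · rintro ⟨k, r⟩ _
        dsimp only
        rw [erase_orderedInsert]
      · rintro ⟨q, k⟩ _
        rfl
    rw [stepB, ← Finset.sum_sigma' (Finset.Icc (1:Int) ((m:Int)+1)) (fun k => PF ((m+1) - k.toNat))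
      (fun k r => (m.descFactorial (k.toNat - 1) : Int)
        * ((((m+1) - k.toNat).factorial / Dn r : Nat) : Int) * (x k * (r.map x).prod))]
    -- Step C: apply the induction hypothesis to each inner sum
    have stepC : ∀ k ∈ Finset.Icc (1:Int) ((m:Int)+1),
        ∑ r ∈ PF ((m+1) - k.toNat),
            ((m.descFactorial (k.toNat - 1) : Int)
              * ((((m+1) - k.toNat).factorial / Dn r : Nat) : Int)
              * (x k * (r.map x).prod))
          = (m.descFactorial (k.toNat - 1) : Int) * x k * Crec x ((m+1) - k.toNat) := by
      intro k hk
      rw [Finset.mem_Icc] at hk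
      have hlt : (m+1) - k.toNat < m+1 := by omega
      rw [← ih _ hlt, Finset.mul_sum]
      refine Finset.sum_congr rfl (fun r _ => ?_)
      ring
    rw [Finset.sum_congr rfl stepC]
    -- Step D: this is exactly the unfolded recurrence
    rw [Crec_succ]
    rw [← List.sum_toFinset _ (List.nodup_range), List.toFinset_range]
    refine Finset.sum_nbij' (fun k => (k - 1).toNat) (fun k0 => (k0 : Int) + 1) ?_ ?_ ?_ ?_ ?_
    · intro k hk
      rw [Finset.mem_Icc] at hk
      rw [Finset.mem_range]
      dsimp only
      omega
    · intro k0 hk0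
      rw [Finset.mem_range] at hk0
      rw [Finset.mem_Icc]
      dsimp only
      omega
    · intro k hk
      rw [Finset.mem_Icc] at hk
      dsimp only
      omega
    · intro k0 hk0
      dsimp only
      simp
    · intro k hk
      rw [Finset.mem_Icc] at hk
      dsimp only
      have h1 : (k - 1).toNat + 1 = k := by omega
      have h2 : ((k-1).toNat : Int) + 1 = k := by omega
      have h3 : k.toNat - 1 = (k-1).toNat := by omega
      have h4 : m - (k-1).toNat = (m+1) - k.toNat := by omega
      rw [h2, h3, h4]

-- ---------- bridging the ports to the mathematical forms ----------

theorem gcd_mod (a b : Int) : Int.gcd b (a % b) = Int.gcd a b := by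
  rw [Int.emod_def, mul_comm, Int.gcd_sub_mul_right_right, Int.gcd_comm]

-- A's Euclid agrees with math.gcd on nonnegative arguments
theorem gcdA_eq (a b : Int) (ha : 0 ≤ a) (hb : 0 ≤ b) : gcdA a b = (Int.gcd a b : Int) := by
  by_cases h : b = 0
  · subst h; rw [gcdA]; simp [Int.gcd]; exact (abs_of_nonneg ha).symm
  · have hbpos : 0 < b := lt_of_le_of_ne hb (Ne.symm h)
    rw [gcdA]; simp only [h, dite_false]
    rw [PySem.Int.mod_eq_emod_of_pos hbpos]
    rw [gcdA_eq b (a % b) hb (Int.emod_nonneg a h), gcd_mod]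
termination_by b.natAbs
decreasing_by
  have h1 := Int.emod_nonneg a h; have h2 := Int.emod_lt_of_pos a hbpos; omega

-- A's num_permutations computes the exact class size n!/Dn q
theorem numPerms_eq (n : Int) (q : List Int) (hq : ∀ x ∈ q, 1 ≤ x) :
    numPerms n q = ((n.toNat.factorial / Dn q : Nat) : Int) := by
  rw [show numPerms n q = PySem.Int.floordiv (factI n)
      ((PySem.Dict.counter q).items.foldl (fun acc kv => acc * (factI kv.2 * kv.1 ^ kv.2.toNat)) 1)
    from rfl]
  have hfold : ∀ (l : List (Int × Int)),
      l.foldl (fun acc kv => acc * (factI kv.2 * kv.1 ^ kv.2.toNat)) 1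
        = (l.map (fun kv : Int × Int => factI kv.2 * kv.1 ^ kv.2.toNat)).prod := by
    intro l
    rw [List.prod_eq_foldl, List.foldl_map]
  rw [hfold, PySem.Dict.items_counter, List.map_map]
  have htf : (PySem.Set.ofList q).toFinset = q.toFinset := by
    ext a; rw [List.mem_toFinset, List.mem_toFinset, PySem.Set.mem_ofList]
  rw [← List.prod_toFinset _ (PySem.Set.nodup_ofList q), htf]
  have hD : ∏ k ∈ q.toFinset,
      ((fun kv : Int × Int => factI kv.2 * kv.1 ^ kv.2.toNat) ∘ fun k => (k, (q.count k : Int))) k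
        = ((Dn q : Nat) : Int) := by
    rw [Dn]
    push_cast
    refine Finset.prod_congr rfl (fun k hk => ?_)
    have hk1 : 1 ≤ k := hq k (List.mem_toFinset.mp hk)
    have hkt : ((k.toNat : Int)) = k := Int.toNat_of_nonneg (by omega)
    simp only [Function.comp, factI, Int.toNat_natCast, hkt]
  rw [hD]
  show PySem.Int.floordiv ((n.toNat.factorial : Nat) : Int) ((Dn q : Nat) : Int) = _
  rw [PySem.Int.floordiv_natCast]

-- the exponent in A: log_fixed as a sum over the column parts
theorem logFixed_eq (p q : List Int) (hp : ∀ x ∈ p, 1 ≤ x) (hq : ∀ x ∈ q, 1 ≤ x) :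
    logFixed p q = (q.map (fun j => (p.map (fun i => (Int.gcd i j : Int))).sum)).sum := by
  unfold logFixed
  induction p with
  | nil => simp
  | cons a t ih =>
    have ha : 1 ≤ a := hp a (by simp)
    rw [List.flatMap_cons, List.sum_append,
      ih (fun x hx => hp x (by simp [hx]))]
    have h1 : (q.map (fun j => gcdA a j)).sum = (q.map (fun j => (Int.gcd a j : Int))).sum := by
      congr 1
      refine List.map_congr_left (fun j hj => ?_)
      exact gcdA_eq a j (by omega) (by linarith [hq j hj])
    rw [h1, ← PySem.List.sum_map_add_int]
    congr 1

-- s ** log_fixed factors through the column parts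
theorem pow_logFixed (s : Int) (p q : List Int) (hp : ∀ x ∈ p, 1 ≤ x) (hq : ∀ x ∈ q, 1 ≤ x) :
    s ^ (logFixed p q).toNat
      = (q.map (fun j => s ^ ((p.map (fun i => (Int.gcd i j : Int))).sum).toNat)).prod := by
  rw [logFixed_eq p q hp hq]
  have hg : ∀ j, 0 ≤ (p.map (fun i => (Int.gcd i j : Int))).sum := by
    intro j
    refine List.sum_nonneg (fun y hy => ?_)
    rcases List.mem_map.mp hy with ⟨i, _, rfl⟩
    positivity
  induction q with
  | nil => simp
  | cons b t ih =>
    have hsum : 0 ≤ (t.map (fun j => (p.map (fun i => (Int.gcd i j : Int))).sum)).sum := by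
      refine List.sum_nonneg (fun y hy => ?_)
      rcases List.mem_map.mp hy with ⟨j, _, rfl⟩
      exact hg j
    rw [List.map_cons, List.sum_cons, List.map_cons, List.prod_cons,
      Int.toNat_add (hg b) hsum, pow_add, ih (fun x hx => hq x (by simp [hx]))]

-- lookup in a dict comprehension {x: g(x) for x in l}
theorem getD_foldl_insert_fn (g : List Int → Int) (l : List (List Int)) (d : PySem.Dict (List Int) Int)
    (x : List Int) :
    (l.foldl (fun d y => d.insert y (g y)) d).getD x 0 = if x ∈ l then g x else d.getD x 0 := by
  induction l generalizing d with
  | nil => simp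
  | cons y l ih =>
    rw [List.foldl_cons, ih, PySem.Dict.getD_insert]
    by_cases hxl : x ∈ l <;> by_cases hxy : x = y <;> simp [hxl, hxy]

-- on a sorted list every element is at most the last one
theorem le_getLast_of_sorted (l : List Int) (hs : l.Pairwise (· ≤ ·)) (a : Int) (ha : a ∈ l)
    (hne : l ≠ []) : a ≤ l.getLast hne := by
  induction l with
  | nil => simp at ha
  | cons b t ih =>
    cases t with
    | nil => simp at ha ⊢; omega
    | cons c t2 =>
      rw [List.getLast_cons (by simp)]
      rcases List.mem_cons.mp ha with rfl | hat
      · exact (List.pairwise_cons.mp hs).1 ((c :: t2).getLast (by simp)) (List.getLast_mem _)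
      · exact ih (List.pairwise_cons.mp hs).2 hat (by simp)

-- full state of B's run-length scan on a sorted positive list
theorem wt_fold_state (p : List Int) (W0 : Nat) (hp : p.Pairwise (· ≤ ·)) (h1 : ∀ x ∈ p, 1 ≤ x) :
    p.foldl (fun st i =>
        let run := if i = st.2.2 then st.2.1 + 1 else 1
        (PySem.Int.floordiv st.1 (run * i), run, i)) ((W0 : Int), (0:Int), (0:Int))
      = (((W0 / Dn p : Nat) : Int), ((p.count (p.getLastD 0) : Nat) : Int), p.getLastD 0) := by
  induction p using List.reverseRecOn with
  | nil => rw [show Dn [] = 1 from by simp [Dn]]; simp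
  | append_singleton l x ih =>
    have hx1 : 1 ≤ x := h1 x (by simp)
    have hxt : ((x.toNat : Int)) = x := Int.toNat_of_nonneg (by omega)
    have hl : l.Pairwise (· ≤ ·) := hp.sublist (by simp)
    have hl1 : ∀ y ∈ l, 1 ≤ y := fun y hy => h1 y (by simp [hy])
    rw [List.foldl_append, List.foldl_cons, List.foldl_nil, ih hl hl1]
    set L := l.getLastD 0 with hLdef
    have hgl : (l ++ [x]).getLastD 0 = x := by
      rw [List.getLastD_concat]
    have hcount : (l ++ [x]).count x = l.count x + 1 := by
      rw [List.count_append]; simp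
    by_cases hxL : x = L
    · simp only [if_pos hxL]
      have hcl : l.count L = l.count x := by rw [hxL]
      have harg : ((l.count L : Nat) : Int) + 1 = (((l.count x + 1 : Nat)) : Int) := by
        rw [hcl]; push_cast; ring
      rw [harg]
      rw [show ((((l.count x + 1 : Nat)) : Int) * x) = (((l.count x + 1) * x.toNat : Nat) : Int) from by
        push_cast; rw [hxt]]
      rw [PySem.Int.floordiv_natCast, Nat.div_div_eq_div_mul, ← Dn_concat]
      rw [hgl, hcount]
    · simp only [if_neg hxL]
      have hcl : l.count x = 0 := by
        cases hle : l with
        | nil => simp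
        | cons b t =>
          rw [← hle]
          have hlne : l ≠ [] := by simp [hle]
          refine List.count_eq_zero_of_not_mem (fun hmem => ?_)
          have h2 : x ≤ l.getLast hlne := le_getLast_of_sorted l hl x hmem hlne
          have h3 : l.getLast hlne ≤ x := by
            have := List.pairwise_append.mp hp
            exact this.2.2 _ (List.getLast_mem hlne) x (by simp)
          have h4 : L = l.getLast hlne := by
            rw [hLdef, List.getLastD_eq_getLast?, List.getLast?_eq_getLast_of_ne_nil hlne]
            rfl
          omega
      rw [show ((1 : Int) * x) = (((l.count x + 1) * x.toNat : Nat) : Int) from by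
        rw [hcl]; push_cast; rw [hxt]]
      rw [PySem.Int.floordiv_natCast, Nat.div_div_eq_div_mul, ← Dn_concat]
      rw [hgl, hcount, hcl]
      norm_num

-- B's run-length weight scan computes W0 // Dn p on a sorted positive list
theorem wt_fold_eq (p : List Int) (W0 : Nat) (hp : p.Pairwise (· ≤ ·)) (h1 : ∀ x ∈ p, 1 ≤ x) :
    (p.foldl (fun st i =>
        let run := if i = st.2.2 then st.2.1 + 1 else 1
        (PySem.Int.floordiv st.1 (run * i), run, i)) ((W0 : Int), (0:Int), (0:Int))).1
      = ((W0 / Dn p : Nat) : Int) := by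
  rw [wt_fold_state p W0 hp h1]

-- the C list after m outer iterations: Crec values up to m, then untouched zeros
def buildC (xf : Int → Int) (W m : Nat) : List Int :=
  (List.range (m+1)).map (fun i => Crec xf i) ++ List.replicate (W - m) 0

theorem buildC_zero (xf : Int → Int) (W : Nat) : buildC xf W 0 = (1:Int) :: List.replicate W 0 := by
  simp [buildC, List.range_one]
  rfl

theorem buildC_getD (xf : Int → Int) (W m i : Nat) (hi : i ≤ m) :
    (buildC xf W m).getD i 0 = Crec xf i := by
  rw [buildC, List.getD_append _ _ _ _ (by simp; omega)]
  exact PySem.List.getD_map_range _ _ _ _ (by omega)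

theorem buildC_set (xf : Int → Int) (W m : Nat) (hm : m + 1 ≤ W) :
    (buildC xf W m).set (m+1) (Crec xf (m+1)) = buildC xf W (m+1) := by
  rw [buildC, buildC, List.set_append_right _ _ (by simp),
    show List.replicate (W - m) (0:Int) = 0 :: List.replicate (W - (m+1)) 0 from by
      rw [← List.replicate_succ]; congr 1; omega]
  rw [List.range_succ (n := m+1), List.map_append]
  simp

-- the inner convolution loop: partial sums and the running falling-factorial coefficient
theorem dp_inner (xfn : Int → Int) (W m : Nat) (hm : m + 1 ≤ W) (Xl : List Int)
    (hX : ∀ k : Nat, k < W → Xl.getD k 0 = xfn (1 + (k:Int))) (j : Nat) (hj : j ≤ m+1) :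
    (PySem.List.pyRange 1 ((j:Int)+1)).foldl (fun st k =>
        (st.1 + st.2 * (Xl.getD (k-1).toNat 0)
          * ((buildC xfn W m).getD ((((m:Int)+1)-k).toNat) 0), st.2 * ((((m:Int)+1) - k))))
      ((0:Int),(1:Int))
    = (((List.range j).map (fun k0 =>
          ((m.descFactorial k0 : Nat) : Int) * xfn ((k0:Int)+1) * Crec xfn (m - k0))).sum,
       ((m.descFactorial j : Nat) : Int)) := by
  induction j with
  | zero =>
    rw [PySem.List.pyRange_one_eq_nil (by omega)]
    simp
  | succ j ih =>
    have h1 : ((j+1 : Nat) : Int) + 1 = ((j:Int)+1) + 1 := by push_cast; ring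
    rw [h1, PySem.List.pyRange_one_succ_right (by omega), List.foldl_append,
      ih (by omega), List.foldl_cons, List.foldl_nil]
    have hk1 : (((j:Int)+1) - 1).toNat = j := by omega
    have hXj : Xl.getD j 0 = xfn (1 + (j:Int)) := hX j (by omega)
    have hCj : ((((m:Int)+1) - ((j:Int)+1)).toNat) = m - j := by omega
    have hCval : (buildC xfn W m).getD (m - j) 0 = Crec xfn (m - j) :=
      buildC_getD xfn W m (m - j) (by omega)
    rw [hk1, hXj, hCj, hCval]
    dsimp only
    rw [Prod.mk.injEq]
    refine ⟨?_, ?_⟩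
    · rw [add_comm (1:Int) (j:Int), List.range_succ, List.map_append, List.sum_append]
      simp
    · have : ((m:Int)+1) - ((j:Int)+1) = ((m - j : Nat) : Int) := by omega
      rw [this, Nat.descFactorial_succ]
      push_cast
      ring

-- the outer DP loop fills the C list with Crec values
theorem dp_outer (xfn : Int → Int) (W : Nat) (Xl : List Int)
    (hX : ∀ k : Nat, k < W → Xl.getD k 0 = xfn (1 + (k:Int))) (m : Nat) (hm : m ≤ W) :
    (PySem.List.pyRange 1 ((m:Int)+1)).foldl (fun C n =>
        C.set n.toNat (((PySem.List.pyRange 1 (n+1)).foldl (fun st k =>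
            (st.1 + st.2 * (Xl.getD (k-1).toNat 0) * (C.getD (n-k).toNat 0), st.2 * (n - k)))
          ((0:Int), (1:Int))).1)) ((1:Int) :: List.replicate W 0)
      = buildC xfn W m := by
  induction m with
  | zero =>
    rw [PySem.List.pyRange_one_eq_nil (by omega), List.foldl_nil, buildC_zero]
  | succ m ih =>
    have h1 : ((m+1 : Nat) : Int) + 1 = ((m:Int)+1) + 1 := by push_cast; ring
    rw [h1, PySem.List.pyRange_one_succ_right (by omega), List.foldl_append,
      ih (by omega), List.foldl_cons, List.foldl_nil]
    have hinner := dp_inner xfn W m (by omega) Xl hX (m+1) le_rfl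
    have h2 : ((m+1 : Nat) : Int) = ((m:Int)+1) := by push_cast; ring
    rw [h2] at hinner
    rw [hinner]
    have hsum : ((List.range (m+1)).map (fun k0 =>
          ((m.descFactorial k0 : Nat) : Int) * xfn ((k0:Int)+1) * Crec xfn (m - k0))).sum
        = Crec xfn (m+1) := by
      rw [Crec_succ]
    rw [hsum, show (((m:Int)+1)).toNat = m+1 from by omega, buildC_set xfn W m (by omega)]

-- B's DP loop computes the Crec values
theorem dp_eq (w s : Int) (hw : 0 ≤ w) (p : List Int) :
    (((PySem.List.pyRange 1 (w+1)).foldl (fun C n =>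
        let ac := (PySem.List.pyRange 1 (n+1)).foldl (fun st k =>
            (st.1 + st.2 * (((PySem.List.pyRange 1 (w+1)).map (fun j =>
                s ^ ((p.map (fun i => (Int.gcd i j : Int))).sum).toNat)).getD (k-1).toNat 0)
              * (C.getD (n-k).toNat 0), st.2 * (n - k)))
          ((0:Int), (1:Int))
        C.set n.toNat ac.1) ((1:Int) :: List.replicate w.toNat 0)).getD w.toNat 0)
      = Crec (fun j => s ^ ((p.map (fun i => (Int.gcd i j : Int))).sum).toNat) w.toNat := by
  set xfn : Int → Int := fun j => s ^ ((p.map (fun i => (Int.gcd i j : Int))).sum).toNat with hxfn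
  set W := w.toNat with hW
  have hwW : w + 1 = ((W:Nat) : Int) + 1 := by omega
  have hX : ∀ k : Nat, k < W →
      (((PySem.List.pyRange 1 (w+1)).map xfn).getD k 0) = xfn (1 + (k:Int)) := by
    intro k hk
    rw [PySem.List.pyRange_one, List.map_map]
    have hlen : (w + 1 - 1).toNat = W := by omega
    rw [hlen]
    exact PySem.List.getD_map_range _ _ _ _ hk
  rw [hwW]
  show ((PySem.List.pyRange 1 ((W:Int)+1)).foldl (fun C n =>
      C.set n.toNat (((PySem.List.pyRange 1 (n+1)).foldl (fun st k =>
          (st.1 + st.2 * (((PySem.List.pyRange 1 ((W:Int)+1)).map xfn).getD (k-1).toNat 0)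
            * (C.getD (n-k).toNat 0), st.2 * (n - k)))
        ((0:Int), (1:Int))).1)) ((1:Int) :: List.replicate W 0)).getD W 0 = Crec xfn W
  rw [dp_outer xfn W ((PySem.List.pyRange 1 ((W:Int)+1)).map xfn) (hwW ▸ hX) W le_rfl,
    buildC_getD xfn W W W le_rfl]

-- the column-side partition sum, as a list sum over A's enumerator
theorem colsum (w : Int) (hw : 0 ≤ w) (xfn : Int → Int) :
    ((partsA (w.toNat+1) w 1).map (fun q =>
        ((w.toNat.factorial / Dn q : Nat) : Int) * (q.map xfn).prod)).sum
      = Crec xfn w.toNat := by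
  obtain ⟨W, rfl⟩ : ∃ W : Nat, w = (W : Int) := ⟨w.toNat, (Int.toNat_of_nonneg hw).symm⟩
  simp only [Int.toNat_natCast]
  rw [← List.sum_toFinset _ (nodup_partsA (W+1) (W : Int) 1)]
  exact main_sum xfn W

theorem solution_eq (w h_ s : Int) (hw : 0 ≤ w) (hh : 0 ≤ h_) :
    solution w h_ s = solution_alt w h_ s := by
  have hA : solution w h_ s = PySem.Int.toStr (PySem.Int.floordiv
      ((((partsA (h_.toNat+1) h_ 1).flatMap (fun rp => (partsA (w.toNat+1) w 1).map (fun cp => (rp, cp)))).map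
        (fun pr => ((partsA (h_.toNat+1) h_ 1).foldl (fun d rp => d.insert rp (numPerms h_ rp)) PySem.Dict.empty).getD pr.1 0
          * (if w = h_ then ((partsA (h_.toNat+1) h_ 1).foldl (fun d rp => d.insert rp (numPerms h_ rp)) PySem.Dict.empty)
             else ((partsA (w.toNat+1) w 1).foldl (fun d cp => d.insert cp (numPerms w cp)) PySem.Dict.empty)).getD pr.2 0
          * s ^ (logFixed pr.1 pr.2).toNat)).sum)
      (factI w * factI h_)) := rfl
  have hB : solution_alt w h_ s = PySem.Int.toStr (PySem.Int.floordiv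
      ((rowTypes (h_.toNat+1) h_ 1).foldl (fun total p =>
        total + (p.foldl (fun st i =>
            let run := if i = st.2.2 then st.2.1 + 1 else 1
            (PySem.Int.floordiv st.1 (run * i), run, i)) (factI h_, (0:Int), (0:Int))).1
          * (((PySem.List.pyRange 1 (w+1)).foldl (fun C n =>
              let ac := (PySem.List.pyRange 1 (n+1)).foldl (fun st k =>
                  (st.1 + st.2 * ((((PySem.List.pyRange 1 (w+1)).map (fun j =>
                      s ^ ((p.map (fun i => (Int.gcd i j : Int))).sum).toNat))).getD (k-1).toNat 0)
                    * (C.getD (n-k).toNat 0), st.2 * (n - k)))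
                ((0:Int), (1:Int))
              C.set n.toNat ac.1) ((1:Int) :: List.replicate w.toNat 0)).getD w.toNat 0)) 0)
      (factI w * factI h_)) := rfl
  rw [hA, hB, rowTypes_eq_partsA _ _ _ le_rfl]
  congr 2
  rw [PySem.List.foldl_add, zero_add]
  rw [List.flatMap_def, List.map_flatten, List.sum_flatten, List.map_map]
  rw [List.map_map]
  refine congrArg List.sum (List.map_congr_left (fun p hp => ?_))
  obtain ⟨hpsrt, hppos, hpsum⟩ := (mem_partsA _ _ _ p (by omega) le_rfl).mp hp
  -- the row-side class size, on both sides
  have hwt : (p.foldl (fun st i =>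
        let run := if i = st.2.2 then st.2.1 + 1 else 1
        (PySem.Int.floordiv st.1 (run * i), run, i)) (factI h_, (0:Int), (0:Int))).1
      = ((h_.toNat.factorial / Dn p : Nat) : Int) := by
    rw [show factI h_ = ((h_.toNat.factorial : Nat) : Int) from rfl]
    exact wt_fold_eq p h_.toNat.factorial hpsrt hppos
  -- the column-side DP value
  have hdp := dp_eq w s hw p
  -- A's inner sum over column partitions
  have hApre : ∀ cp ∈ partsA (w.toNat+1) w 1,
      ((partsA (h_.toNat+1) h_ 1).foldl (fun d rp => d.insert rp (numPerms h_ rp)) PySem.Dict.empty).getD p 0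
        * (if w = h_ then ((partsA (h_.toNat+1) h_ 1).foldl (fun d rp => d.insert rp (numPerms h_ rp)) PySem.Dict.empty)
           else ((partsA (w.toNat+1) w 1).foldl (fun d cp => d.insert cp (numPerms w cp)) PySem.Dict.empty)).getD cp 0
        * s ^ (logFixed p cp).toNat
      = ((h_.toNat.factorial / Dn p : Nat) : Int)
        * (((w.toNat.factorial / Dn cp : Nat) : Int)
          * (cp.map (fun j => s ^ ((p.map (fun i => (Int.gcd i j : Int))).sum).toNat)).prod) := by
    intro cp hcp
    obtain ⟨hcsrt, hcpos, hcsum⟩ := (mem_partsA _ _ _ cp (by omega) le_rfl).mp hcp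
    have h1 : ((partsA (h_.toNat+1) h_ 1).foldl (fun d rp => d.insert rp (numPerms h_ rp)) PySem.Dict.empty).getD p 0
        = numPerms h_ p := by
      rw [getD_foldl_insert_fn (fun y => numPerms h_ y), if_pos hp]
    have h2 : (if w = h_ then ((partsA (h_.toNat+1) h_ 1).foldl (fun d rp => d.insert rp (numPerms h_ rp)) PySem.Dict.empty)
           else ((partsA (w.toNat+1) w 1).foldl (fun d cp => d.insert cp (numPerms w cp)) PySem.Dict.empty)).getD cp 0
        = numPerms w cp := by
      by_cases hwh : w = h_
      · subst hwh
        rw [if_pos rfl, getD_foldl_insert_fn (fun y => numPerms w y), if_pos hcp]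
      · rw [if_neg hwh, getD_foldl_insert_fn (fun y => numPerms w y), if_pos hcp]
    rw [h1, h2, numPerms_eq h_ p hppos, numPerms_eq w cp hcpos,
      pow_logFixed s p cp hppos hcpos]
    ring
  simp only [Function.comp_apply]
  rw [hwt, hdp, List.map_map]
  have hcomp : ((fun pr : List Int × List Int =>
      ((partsA (h_.toNat+1) h_ 1).foldl (fun d rp => d.insert rp (numPerms h_ rp)) PySem.Dict.empty).getD pr.1 0
        * (if w = h_ then ((partsA (h_.toNat+1) h_ 1).foldl (fun d rp => d.insert rp (numPerms h_ rp)) PySem.Dict.empty)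
           else ((partsA (w.toNat+1) w 1).foldl (fun d cp => d.insert cp (numPerms w cp)) PySem.Dict.empty)).getD pr.2 0
        * s ^ (logFixed pr.1 pr.2).toNat) ∘ (fun cp => (p, cp)))
      = fun cp =>
      ((partsA (h_.toNat+1) h_ 1).foldl (fun d rp => d.insert rp (numPerms h_ rp)) PySem.Dict.empty).getD p 0
        * (if w = h_ then ((partsA (h_.toNat+1) h_ 1).foldl (fun d rp => d.insert rp (numPerms h_ rp)) PySem.Dict.empty)
           else ((partsA (w.toNat+1) w 1).foldl (fun d cp => d.insert cp (numPerms w cp)) PySem.Dict.empty)).getD cp 0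
        * s ^ (logFixed p cp).toNat := rfl
  rw [hcomp, List.map_congr_left hApre, List.sum_map_mul_left]
  congr 1
  exact colsum w hw (fun j => s ^ ((p.map (fun i => (Int.gcd i j : Int))).sum).toNat)

-- ===== VERDICT (by name: the statement is the Claim_ definition above) =====
theorem solution_spec : Claim_equal_solution := by
  intro w h_ s _ hpre
  exact solution_eq w h_ s hpre.1 hpre.2
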